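-- pv_equiv track=rewrite | github.com/charlesmerritt/balatrobot-mdp | src/balatrobot/hand_evaluator.py | _group_by_rank
-- ===== SOURCE A (Python) =====
-- from typing import Any, Iterable
--
-- def get_card_rank(card: dict[str, Any]) -> str | None:
--     base = card.get("base") if card else None
--     return base.get("value") if isinstance(base, dict) else None
--
-- def _group_by_rank(cards: list[dict[str, Any]]) -> dict[str, list[int]]:
--     rank_to_indices: dict[str, list[int]] = {}
--     for idx, card in enumerate(cards):
--         rank = get_card_rank(card)
--         if not rank:
--             continue
--         rank_to_indices.setdefault(rank, []).append(idx)
--     return rank_to_indices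
-- ===== SOURCE B (Python) =====
-- from typing import Any
--
--
-- def get_card_rank(card: dict[str, Any]) -> str | None:
--     base = card.get("base") if card else None
--     return base.get("value") if isinstance(base, dict) else None
--
--
-- def _group_by_rank(cards: list[dict[str, Any]]) -> dict[str, list[int]]:
--     ranks = [get_card_rank(card) for card in cards]
--     keys = list(dict.fromkeys(r for r in ranks if r))
--     return {k: [i for i, r in enumerate(ranks) if r == k] for k in keys}
-- ===== Notes on version B (the rewrite author's own statement) =====
-- stated objective: alternative
-- what changed: Replaces the single-pass setdefault accumulation with a two-phase plan: compute all ranks once, dedupe the truthy ranks in first-appearance order with dict.fromkeys, then build each group by a per-key scan in a dict comprehension.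
import Mathlib
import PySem

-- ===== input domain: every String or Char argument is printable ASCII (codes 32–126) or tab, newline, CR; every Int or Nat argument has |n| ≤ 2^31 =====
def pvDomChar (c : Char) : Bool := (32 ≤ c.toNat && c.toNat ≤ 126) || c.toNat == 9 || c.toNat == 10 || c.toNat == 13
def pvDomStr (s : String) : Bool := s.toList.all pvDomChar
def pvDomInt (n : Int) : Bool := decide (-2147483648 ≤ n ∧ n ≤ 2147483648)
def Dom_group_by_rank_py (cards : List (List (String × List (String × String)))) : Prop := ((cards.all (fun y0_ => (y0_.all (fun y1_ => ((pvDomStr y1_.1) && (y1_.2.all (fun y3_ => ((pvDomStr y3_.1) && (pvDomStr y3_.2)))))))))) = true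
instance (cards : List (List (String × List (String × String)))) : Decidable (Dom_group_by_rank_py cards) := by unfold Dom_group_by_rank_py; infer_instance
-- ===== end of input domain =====

-- B replaces A's single-pass setdefault accumulation by "compute all ranks, dedupe the
-- truthy ones in first-appearance order, then build each group by a per-key scan";
-- objective: alternative decomposition (same returned value, key order included).

-- ===== PORT A =====

-- shared helper: get_card_rank (Source B reuses the very same module helper)
def getCardRank (card : List (String × List (String × String))) : Option String :=
  let base : Option (List (String × String)) :=
    if card = [] then none else (PySem.Dict.mk card).get? "base"
  -- isinstance(base, dict): under the type convention a present "base" value IS a dict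
  match base with
  | some b => (PySem.Dict.mk b).get? "value"
  | none => none

-- _group_by_rank: the enumerate loop with the `if not rank: continue` skip;
-- `setdefault(rank, []).append(idx)` is exactly `d[rank] = d.get(rank, []) + [idx]`
-- with setdefault's key-position rule, i.e. Dict.modify rank [] (· ++ [idx]).
def group_by_rank_py (cards : List (List (String × List (String × String)))) : List (String × List Int) :=
  ((PySem.List.enumerate cards).foldl
    (fun (d : PySem.Dict String (List Int)) p =>
      match getCardRank p.2 with
      | none => d
      | some r => if r = "" then d else d.modify r [] (· ++ [p.1]))
    PySem.Dict.empty).items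

-- ===== PORT B =====
def group_by_rank_py_alt (cards : List (List (String × List (String × String)))) : List (String × List Int) :=
  let ranks := cards.map getCardRank
  -- keys = list(dict.fromkeys(r for r in ranks if r)) — the truthy ranks, deduped in order
  let keys := PySem.List.dedup (ranks.filterMap (fun r =>
    match r with
    | none => none
    | some s => if s = "" then none else some s))
  keys.map (fun k =>
    (k, (PySem.List.enumerate ranks).filterMap (fun p =>
          if p.2 = some k then some p.1 else none)))

-- ===== PRECONDITION & SPEC =====
def Spec_group_by_rank_py (cards : List (List (String × List (String × String)))) (out : List (String × List Int)) : Prop := out = group_by_rank_py_alt cards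
instance (cards : List (List (String × List (String × String)))) (out : List (String × List Int)) : Decidable (Spec_group_by_rank_py cards out) := by unfold Spec_group_by_rank_py; infer_instance

-- ===== CLAIM (what is proved, stated in full; the proofs are below) =====
def Claim_equal_group_by_rank_py : Prop := ∀ (cards : List (List (String × List (String × String)))), Dom_group_by_rank_py cards → Spec_group_by_rank_py cards (group_by_rank_py cards)

-- ===== LEMMAS AND PROOFS =====

-- the (rank, index) pairs A's loop actually touches, starting the index at s
def pvTruthy (r : Option String) : Option String :=
  match r with
  | none => none
  | some s => if s = "" then none else some s

def pvPairs (cards : List (List (String × List (String × String)))) (s : Int) :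
    List (String × Int) :=
  (PySem.List.enumerate cards s).filterMap (fun p =>
    match getCardRank p.2 with
    | none => none
    | some r => if r = "" then none else some (r, p.1))

-- the ranks appearing in pvPairs are exactly the truthy ranks, in order
theorem pvPairs_map_fst (cards : List (List (String × List (String × String)))) (s : Int) :
    (pvPairs cards s).map (·.1) = (cards.map getCardRank).filterMap pvTruthy := by
  induction cards generalizing s with
  | nil => rfl
  | cons c cs ih =>
    simp only [pvPairs, PySem.List.enumerate_cons, List.filterMap_cons, List.map_cons] at *
    cases h : getCardRank c with
    | none => simpa [pvTruthy, h, List.filterMap_map] using ih (s + 1)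
    | some r =>
      by_cases hr : r = "" <;>
        · have := ih (s + 1)
          simp [pvTruthy, hr, List.filterMap_map] at this ⊢
          exact this

-- for a nonempty key k, A's per-key filter over the pairs equals B's index scan
theorem pvPairs_group (cards : List (List (String × List (String × String)))) (s : Int)
    (k : String) (hk : k ≠ "") :
    ((pvPairs cards s).filter (fun p => p.1 == k)).map (·.2) =
      (PySem.List.enumerate (cards.map getCardRank) s).filterMap (fun p =>
        if p.2 = some k then some p.1 else none) := by
  induction cards generalizing s with
  | nil => rfl
  | cons c cs ih =>
    simp only [pvPairs, List.map_cons, PySem.List.enumerate_cons, List.filterMap_cons] at *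
    cases h : getCardRank c with
    | none => simpa [h] using ih (s + 1)
    | some r =>
      have hih := ih (s + 1)
      by_cases hr : r = ""
      · have hne : r ≠ k := fun e => hk (e ▸ hr)
        simpa [h, hr, hne, Ne.symm hne, hk] using hih
      · by_cases hrk : r = k
        · subst hrk
          simpa [hr] using hih
        · simpa [hr, hrk, Ne.symm hrk] using hih

theorem group_by_rank_py_eq_fold_pairs (cards : List (List (String × List (String × String)))) :
    group_by_rank_py cards =
      ((pvPairs cards 0).foldl
        (fun (d : PySem.Dict String (List Int)) p => d.modify p.1 [] (· ++ [p.2]))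
        PySem.Dict.empty).items := by
  unfold group_by_rank_py pvPairs
  rw [List.foldl_filterMap]
  apply congrArg
  apply PySem.List.foldl_congr_mem
  intro d p _
  cases getCardRank p.2 with
  | none => simp
  | some r => by_cases hr : r = "" <;> simp [hr]

-- ===== VERDICT (by name: the statement is the Claim_ definition above) =====
theorem group_by_rank_py_spec : Claim_equal_group_by_rank_py := by
  intro cards _
  unfold Spec_group_by_rank_py
  simp only [group_by_rank_py_alt]
  rw [group_by_rank_py_eq_fold_pairs]
  have hnd := PySem.Dict.nodup_keys_foldl_modify_key (pvPairs cards 0) Prod.fst []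
      (fun _ p v => v ++ [p.2]) PySem.Dict.empty PySem.Dict.nodup_keys_empty
  rw [PySem.Dict.items_eq_map_keys _ hnd ([] : List Int)]
  rw [PySem.Dict.keys_foldl_modify_key (pvPairs cards 0) Prod.fst []
      (fun _ p v => v ++ [p.2]) PySem.Dict.empty]
  rw [PySem.Dict.keys_empty, PySem.Set.update_nil_left, PySem.List.dedup_eq_ofList]
  rw [pvPairs_map_fst]
  apply List.map_congr_left
  intro k hk
  have hk' : k ∈ (cards.map getCardRank).filterMap pvTruthy := (PySem.Set.mem_ofList _ _).mp hk
  have hkne : k ≠ "" := by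
    obtain ⟨r, _, hr⟩ := List.mem_filterMap.mp hk'
    cases r with
    | none => simp [pvTruthy] at hr
    | some s =>
      by_cases hs : s = "" <;> simp [pvTruthy, hs] at hr
      exact hr ▸ hs
  refine Prod.ext rfl ?_
  show ((pvPairs cards 0).foldl
      (fun (d : PySem.Dict String (List Int)) p => d.modify p.1 [] (· ++ [p.2]))
      PySem.Dict.empty).getD k [] = _
  rw [PySem.Dict.getD_foldl_modify_append, PySem.Dict.getD_empty]
  simpa using pvPairs_group cards 0 k hkne
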